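-- pv_equiv track=rewrite | github.com/saiefert/time-calculator | time_calculator.py | calc_day_off
-- ===== SOURCE A (Python) =====
-- def calc_day_off(day_off, num_days):
--     if len(day_off) == 0:
--         return ''
--     elif num_days == 0:
--         return f', {day_off.lower().capitalize()}'
--
--     week = {"monday": 1, "tuesday": 2, "wednesday": 3,
--             "thursday": 4, "friday": 5, "saturday": 6, "sunday": 7}
--
--     daysAfter = num_days
--     num = week.get(day_off.lower())
--     newDay = ''
--
--     verNum = (num + daysAfter) % 7
--
--     for key, value in week.items():
--          if (num + daysAfter) % 7 == value:
--              newDay=key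
--              break
--
--     if newDay != day_off.lower() and verNum == 0:
--         return ", Sunday"
--
--     return f', {newDay.capitalize()}'
-- ===== SOURCE B (Python) =====
-- def calc_day_off(day_off, num_days):
--     if len(day_off) == 0:
--         return ''
--     if num_days == 0:
--         return f', {day_off.lower().capitalize()}'
--     days = ['Monday', 'Tuesday', 'Wednesday', 'Thursday', 'Friday', 'Saturday', 'Sunday']
--     num = {d.lower(): i + 1 for i, d in enumerate(days)}[day_off.lower()]
--     return f', {days[(num + num_days - 1) % 7]}'
-- ===== Notes on version B (the rewrite author's own statement) =====
-- stated objective: simpler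
-- what changed: B replaces A's reverse-lookup scan over the week dict plus the two special branches (verNum==0 -> ', Sunday' and the newDay comparison) with a single modular index (num + num_days - 1) % 7 into an ordered list of day names.
import Mathlib
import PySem

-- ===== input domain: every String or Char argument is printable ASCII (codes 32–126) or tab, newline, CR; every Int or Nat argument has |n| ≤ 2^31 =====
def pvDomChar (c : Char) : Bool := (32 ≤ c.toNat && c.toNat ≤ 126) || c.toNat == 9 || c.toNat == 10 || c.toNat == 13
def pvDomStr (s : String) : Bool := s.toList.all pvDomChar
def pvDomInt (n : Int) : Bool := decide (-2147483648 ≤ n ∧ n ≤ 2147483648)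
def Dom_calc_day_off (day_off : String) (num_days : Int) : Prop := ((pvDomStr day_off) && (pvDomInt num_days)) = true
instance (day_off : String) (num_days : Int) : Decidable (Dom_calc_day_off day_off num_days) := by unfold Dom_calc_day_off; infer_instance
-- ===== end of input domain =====

-- B replaces A's reverse-lookup scan over the week dict and its two special branches
-- with a single modular index into an ordered list of day names (simpler; same cost).


-- ===== PORT A =====
-- str.capitalize() on the ASCII domain: first char uppercased, the rest lowercased (exact there)
def pyCapitalizeChars : List Char → List Char
  | [] => []
  | c :: cs => PySem.Chars.upperChar c :: cs.map PySem.Chars.lowerChar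

def pyCapitalize (s : String) : String := String.ofList (pyCapitalizeChars s.toList)

def pvWeek : PySem.Dict String Int :=
  ⟨[("monday", 1), ("tuesday", 2), ("wednesday", 3),
    ("thursday", 4), ("friday", 5), ("saturday", 6), ("sunday", 7)]⟩

-- the loop 'for key, value in week.items(): if (num + daysAfter) % 7 == value: newDay = key; break'
-- (newDay stays '' when no item matches); t is num + daysAfter
def pvFindDay : List (String × Int) → Int → String
  | [], _ => ""
  | (k, v) :: rest, t => if PySem.Int.mod t 7 = v then k else pvFindDay rest t

def calc_day_off (day_off : String) (num_days : Int) : String :=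
  if PySem.Str.len day_off = 0 then ""
  else if num_days = 0 then ", " ++ pyCapitalize (PySem.Str.lower day_off)
  else
    let week := pvWeek
    let daysAfter := num_days
    match PySem.Dict.get? week (PySem.Str.lower day_off) with
    | none => ""   -- Python: num is None and 'num + daysAfter' raises TypeError; excluded by Pre_
    | some num =>
      let verNum := PySem.Int.mod (num + daysAfter) 7
      let newDay := pvFindDay (PySem.Dict.items week) (num + daysAfter)
      if newDay ≠ PySem.Str.lower day_off ∧ verNum = 0 then ", Sunday"
      else ", " ++ pyCapitalize newDay

-- ===== PORT B =====
def pvDays : List String :=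
  ["Monday", "Tuesday", "Wednesday", "Thursday", "Friday", "Saturday", "Sunday"]

-- {d.lower(): i + 1 for i, d in enumerate(days)}
def pvNameIndex : PySem.Dict String Int :=
  ⟨(PySem.List.enumerate pvDays).map (fun p => (PySem.Str.lower p.2, p.1 + 1))⟩

def calc_day_off_alt (day_off : String) (num_days : Int) : String :=
  if PySem.Str.len day_off = 0 then ""
  else if num_days = 0 then ", " ++ pyCapitalize (PySem.Str.lower day_off)
  else
    match PySem.Dict.get? pvNameIndex (PySem.Str.lower day_off) with
    | none => ""   -- Python: KeyError; excluded by Pre_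
    | some num =>
      ", " ++ (PySem.List.pyGet? pvDays (PySem.Int.mod (num + num_days - 1) 7)).getD ""

-- ===== PRECONDITION & SPEC =====
-- Pre_ excludes exactly the inputs where A raises (TypeError: nonempty day_off whose lower()
-- is not a week-dict key, with num_days ≠ 0); B raises there too (KeyError).
def Pre_calc_day_off (day_off : String) (num_days : Int) : Prop :=
  PySem.Str.len day_off = 0 ∨ num_days = 0 ∨
    PySem.Str.lower day_off ∈
      (["monday", "tuesday", "wednesday", "thursday", "friday", "saturday", "sunday"] : List String)
instance (day_off : String) (num_days : Int) : Decidable (Pre_calc_day_off day_off num_days) := by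
  unfold Pre_calc_day_off; infer_instance

def pvWitness_calc_day_off : String × Int := ("Monday", 3)

def Spec_calc_day_off (day_off : String) (num_days : Int) (out : String) : Prop := out = calc_day_off_alt day_off num_days
instance (day_off : String) (num_days : Int) (out : String) : Decidable (Spec_calc_day_off day_off num_days out) := by unfold Spec_calc_day_off; infer_instance

-- ===== CLAIM (what is proved, stated in full; the proofs are below) =====
def Claim_equal_calc_day_off : Prop := ∀ (day_off : String) (num_days : Int), Dom_calc_day_off day_off num_days → Pre_calc_day_off day_off num_days → Spec_calc_day_off day_off num_days (calc_day_off day_off num_days)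

-- ===== LEMMAS AND PROOFS =====

-- core of the valid-day arm (num_days ≠ 0): A's scan + special branches = B's modular index
lemma pv_core_eq (num n : Int) (name : String) (hname : name ≠ "") :
    (if pvFindDay (PySem.Dict.items pvWeek) (num + n) ≠ name ∧ PySem.Int.mod (num + n) 7 = 0
       then ", Sunday"
       else ", " ++ pyCapitalize (pvFindDay (PySem.Dict.items pvWeek) (num + n)))
    = ", " ++ (PySem.List.pyGet? pvDays (PySem.Int.mod (num + n - 1) 7)).getD "" := by
  have he : ∀ a : Int, PySem.Int.mod a 7 = a % 7 := fun a =>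
    PySem.Int.mod_eq_emod_of_pos (by norm_num)
  have hr0 : 0 ≤ (num + n) % 7 := Int.emod_nonneg _ (by norm_num)
  have hr7 : (num + n) % 7 < 7 := Int.emod_lt_of_pos _ (by norm_num)
  have hrel : (num + n - 1) % 7 = if (num + n) % 7 = 0 then 6 else (num + n) % 7 - 1 := by
    split <;> omega
  simp only [pvFindDay, pvWeek, he]
  rw [hrel]
  generalize (num + n) % 7 = r at hr0 hr7 ⊢
  interval_cases r <;> norm_num [Ne.symm hname] <;> decide

-- ===== VERDICT (by name: the statement is the Claim_ definition above) =====
theorem calc_day_off_spec : Claim_equal_calc_day_off := by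
  unfold Claim_equal_calc_day_off
  intro d n _ hpre
  unfold Spec_calc_day_off calc_day_off calc_day_off_alt
  by_cases h0 : PySem.Str.len d = 0
  · have hd : d = "" := by simpa using h0
    simp [hd]
  · by_cases hn : n = 0
    · simp [hn]
    · simp only [h0, hn, if_false]
      rcases hpre with h | h | hmem
      · exact absurd h h0
      · exact absurd h hn
      · simp only [List.mem_cons, List.not_mem_nil, or_false] at hmem
        rcases hmem with h | h | h | h | h | h | h <;> rw [h]
        · exact pv_core_eq 1 n "monday" (by decide)
        · exact pv_core_eq 2 n "tuesday" (by decide)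
        · exact pv_core_eq 3 n "wednesday" (by decide)
        · exact pv_core_eq 4 n "thursday" (by decide)
        · exact pv_core_eq 5 n "friday" (by decide)
        · exact pv_core_eq 6 n "saturday" (by decide)
        · exact pv_core_eq 7 n "sunday" (by decide)
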